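-- pv_equiv track=rewrite | github.com/Jhoel-ibarra/Codember | challenge01/main.py | ordenar
-- ===== SOURCE A (Python) =====
-- def ordenar(data):
--     nuevo= []
--     aux =[]
--     for elem in data:
--       if elem != []:
--         aux.extend(elem)
--       else:
--         nuevo.append(aux)
--         aux = []
--
--     return nuevo
-- ===== SOURCE B (Python) =====
-- def ordenar(data):
--     # index-driven: repeatedly locate the next [] delimiter, flatten the slice
--     # before it, and continue on the remainder; the trailing segment (after the
--     # last delimiter) is never processed, matching the task.
--     res = []
--     rest = data
--     while True:
--         try:
--             k = rest.index([])
--         except ValueError: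
--             return res
--         grupo = []
--         for sub in rest[:k]:
--             grupo.extend(sub)
--         res.append(grupo)
--         rest = rest[k + 1:]
-- ===== Notes on version B (the rewrite author's own statement) =====
-- stated objective: alternative
-- what changed: Replaces A's single accumulator pass (extend into aux, flush on each delimiter) by delimiter search with list.index followed by slice-and-flatten of each segment, looping on the remainder after the delimiter.
import Mathlib
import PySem

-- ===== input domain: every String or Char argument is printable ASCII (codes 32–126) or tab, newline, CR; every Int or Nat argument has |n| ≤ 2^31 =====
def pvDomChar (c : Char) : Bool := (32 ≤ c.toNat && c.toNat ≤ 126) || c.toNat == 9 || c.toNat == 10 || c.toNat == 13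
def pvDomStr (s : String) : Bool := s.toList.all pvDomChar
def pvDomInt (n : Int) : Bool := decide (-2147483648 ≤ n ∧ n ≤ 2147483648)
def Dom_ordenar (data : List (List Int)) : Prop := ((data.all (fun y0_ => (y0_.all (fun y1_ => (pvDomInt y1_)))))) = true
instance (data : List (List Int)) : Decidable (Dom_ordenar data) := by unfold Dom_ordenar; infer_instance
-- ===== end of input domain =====

-- B replaces A's accumulator pass by repeated delimiter search (list.index) plus
-- slice-and-flatten of each segment; same return value, no speed claim.

-- ===== PORT A =====
-- A: one pass with accumulators nuevo / aux; extend aux, flush it on each [] delimiter.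
def ordenar (data : List (List Int)) : List (List Int) :=
  (data.foldl
    (fun (st : List (List Int) × List Int) elem =>
      if elem ≠ [] then (st.1, st.2 ++ elem) else (st.1 ++ [st.2], []))
    ([], [])).1

-- ===== PORT B =====
-- B helper: the while loop of Source B as tail recursion on the remaining list.
def ordenarGo (res : List (List Int)) (rest : List (List Int)) : List (List Int) :=
  match h : PySem.List.index? rest ([] : List Int) with
  | none => res
  | some k =>
      ordenarGo
        (res ++ [(PySem.List.slice rest none (some (k : Int))).foldl (fun g s => g ++ s) []])
        (PySem.List.slice rest (some ((k : Int) + 1)) none)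
  termination_by rest.length
  decreasing_by
    obtain ⟨hk, -, -⟩ := PySem.List.getElem_of_index?_eq_some h
    have hcast : ((k : Int) + 1) = ((k + 1 : Nat) : Int) := by push_cast; ring
    rw [hcast, PySem.List.slice_from_natCast, List.length_drop]
    omega

def ordenar_alt (data : List (List Int)) : List (List Int) :=
  ordenarGo [] data

-- ===== PRECONDITION & SPEC =====
def Spec_ordenar (data : List (List Int)) (out : List (List Int)) : Prop := out = ordenar_alt data
instance (data : List (List Int)) (out : List (List Int)) : Decidable (Spec_ordenar data out) := by unfold Spec_ordenar; infer_instance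

-- ===== CLAIM (what is proved, stated in full; the proofs are below) =====
def Claim_equal_ordenar : Prop := ∀ (data : List (List Int)), Dom_ordenar data → Spec_ordenar data (ordenar data)

-- ===== LEMMAS AND PROOFS =====

-- A's fold, written as structural recursion carrying (res, aux).
def goP (res : List (List Int)) (aux : List Int) (rest : List (List Int)) : List (List Int) :=
  match rest with
  | [] => res
  | x :: xs => if x = [] then goP (res ++ [aux]) [] xs else goP res (aux ++ x) xs

lemma foldl_eq_goP (rest : List (List Int)) (res : List (List Int)) (aux : List Int) :
    (rest.foldl
      (fun (st : List (List Int) × List Int) elem =>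
        if elem ≠ [] then (st.1, st.2 ++ elem) else (st.1 ++ [st.2], []))
      (res, aux)).1 = goP res aux rest := by
  induction rest generalizing res aux with
  | nil => simp [goP]
  | cons x xs ih =>
      rw [List.foldl_cons]
      by_cases hx : x = []
      · rw [if_neg (fun hne => hne hx)]
        conv_rhs => rw [goP]
        rw [if_pos hx]
        exact ih (res ++ [aux]) []
      · rw [if_pos hx]
        conv_rhs => rw [goP]
        rw [if_neg hx]
        exact ih res (aux ++ x)

lemma foldl_append_flatten (l : List (List Int)) (init : List Int) :
    l.foldl (fun g s => g ++ s) init = init ++ l.flatten := by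
  induction l generalizing init with
  | nil => simp
  | cons x xs ih => simp [List.foldl_cons, ih]

lemma ordenarGo_none (res rest : List (List Int))
    (h : PySem.List.index? rest ([] : List Int) = none) :
    ordenarGo res rest = res := by
  rw [ordenarGo]
  split
  · rfl
  · next k h' => rw [h] at h'; cases h'

lemma ordenarGo_some (res rest : List (List Int)) (k : Nat)
    (h : PySem.List.index? rest ([] : List Int) = some k) :
    ordenarGo res rest = ordenarGo (res ++ [(rest.take k).flatten]) (rest.drop (k + 1)) := by
  rw [ordenarGo]
  split
  · next h' => rw [h'] at h; cases h
  · next k' h' =>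
      obtain rfl : k = k' := Option.some.inj (h.symm.trans h')
      have hcast : ∀ m : Nat, ((m : Int) + 1) = ((m + 1 : Nat) : Int) := fun m => by
        push_cast; ring
      rw [hcast, PySem.List.slice_from_natCast, PySem.List.slice_to_natCast,
        foldl_append_flatten]
      simp

lemma goP_none (rest : List (List Int)) :
    ∀ (res : List (List Int)) (aux : List Int),
      PySem.List.index? rest ([] : List Int) = none → goP res aux rest = res := by
  induction rest with
  | nil => intro res aux _; simp [goP]
  | cons x xs ih =>
      intro res aux h
      by_cases hx : x = []
      · subst hx; rw [PySem.List.index?_cons_self] at h; cases h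
      · rw [PySem.List.index?_cons_of_ne xs hx] at h
        simp only [Option.map_eq_none_iff] at h
        conv_lhs => rw [goP]
        rw [if_neg hx]
        exact ih res (aux ++ x) h

lemma goP_some (rest : List (List Int)) :
    ∀ (res : List (List Int)) (aux : List Int) (k : Nat),
      PySem.List.index? rest ([] : List Int) = some k →
      goP res aux rest = ordenarGo (res ++ [aux ++ (rest.take k).flatten]) (rest.drop (k + 1)) := by
  induction rest with
  | nil => intro res aux k h; simp [PySem.List.index?_eq_idxOf?] at h
  | cons x xs ih =>
      intro res aux k h
      by_cases hx : x = []
      · subst hx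
        rw [PySem.List.index?_cons_self] at h
        injection h with hk
        subst hk
        simp only [List.take_zero, List.flatten_nil, List.append_nil, List.drop_succ_cons,
          List.drop_zero]
        conv_lhs => rw [goP]
        rw [if_pos rfl]
        cases h' : PySem.List.index? xs ([] : List Int) with
        | none => rw [goP_none xs _ _ h', ordenarGo_none _ _ h']
        | some k' =>
            rw [ih _ _ _ h', ordenarGo_some _ _ _ h']
            simp
      · rw [PySem.List.index?_cons_of_ne xs hx] at h
        cases h' : PySem.List.index? xs ([] : List Int) with
        | none => rw [h'] at h; cases h
        | some k' =>
            rw [h'] at h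
            simp only [Option.map_some, Option.some.injEq] at h
            subst h
            conv_lhs => rw [goP]
            rw [if_neg hx, ih _ _ _ h']
            simp [List.take_succ_cons, List.append_assoc]

-- ===== VERDICT (by name: the statement is the Claim_ definition above) =====
theorem ordenar_spec : Claim_equal_ordenar := by
  intro data _
  unfold Spec_ordenar ordenar ordenar_alt
  rw [foldl_eq_goP]
  cases h : PySem.List.index? data ([] : List Int) with
  | none => rw [goP_none data _ _ h, ordenarGo_none _ _ h]
  | some k =>
      rw [goP_some data _ _ _ h, ordenarGo_some _ _ _ h]
      simp
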